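-- pv_equiv track=rewrite | github.com/clclab/clc-labs | _drafts/retention-recognition/materials/src/experiment.py | split_sentences
-- ===== SOURCE A (Python) =====
-- def contains_repetitions(sentence):
--     """Checks if a sentence contains repetitions"""
--     for word, next_word in zip(sentence, sentence[1:]):
--         if word == next_word:
--             return True
--     return False
--
-- def split_sentences(sentences):
--     """Split sentences in correct and incorrect ones"""
--     correct = []
--     incorrect = []
--     for sentence in sentences:
--         if contains_repetitions(sentence):
--             incorrect.append(sentence)
--         else:
--             correct.append(sentence)
--     return correct, incorrect
-- ===== SOURCE B (Python) =====
-- def _squeeze(sentence):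
--     """The sentence with every run of adjacent equal words collapsed to one word."""
--     squeezed = []
--     for word in sentence:
--         if not squeezed or squeezed[-1] != word:
--             squeezed.append(word)
--     return squeezed
--
-- def split_sentences(sentences):
--     """Split sentences in correct and incorrect ones"""
--     flagged = [(sentence, _squeeze(sentence) == sentence) for sentence in sentences]
--     correct = [sentence for sentence, ok in flagged if ok]
--     incorrect = [sentence for sentence, ok in flagged if not ok]
--     return correct, incorrect
-- ===== Notes on version B (the rewrite author's own statement) =====
-- stated objective: alternative
-- what changed: A sentence is judged correct iff it is a fixed point of run-compression (rebuilding it with adjacent equal runs collapsed and comparing to the original), replacing the early-exit pairwise zip scan, and the partition is done by staged passes (flag all, then two filters) instead of one loop with two accumulators.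
import Mathlib
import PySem

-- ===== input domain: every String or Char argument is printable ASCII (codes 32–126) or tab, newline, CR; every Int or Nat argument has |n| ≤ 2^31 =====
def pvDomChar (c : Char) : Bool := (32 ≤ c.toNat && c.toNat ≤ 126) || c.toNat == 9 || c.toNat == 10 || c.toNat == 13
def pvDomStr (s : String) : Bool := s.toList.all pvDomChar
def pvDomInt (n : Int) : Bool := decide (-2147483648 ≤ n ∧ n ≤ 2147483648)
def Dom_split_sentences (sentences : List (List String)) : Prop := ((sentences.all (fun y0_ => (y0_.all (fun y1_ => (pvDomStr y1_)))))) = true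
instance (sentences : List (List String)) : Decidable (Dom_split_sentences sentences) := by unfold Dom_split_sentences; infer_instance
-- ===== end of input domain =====

-- B judges a sentence correct iff it is a fixed point of adjacent-run compression and partitions by staged passes (flag, then two filters) instead of one loop with two accumulators (objective: alternative).

-- ===== PORT A =====
-- 'for word, next_word in zip(sentence, sentence[1:]): if word == next_word: return True' / 'return False'
def containsRepetitionsGo : List (String × String) → Bool
  | [] => false
  | (w, nw) :: rest => if w == nw then true else containsRepetitionsGo rest

def containsRepetitions (sentence : List String) : Bool :=
  containsRepetitionsGo (List.zip sentence (PySem.List.slice sentence (some 1) none))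

def split_sentences (sentences : List (List String)) : List (List String) × List (List String) :=
  sentences.foldl
    (fun acc sentence =>
      if containsRepetitions sentence then (acc.1, acc.2 ++ [sentence])
      else (acc.1 ++ [sentence], acc.2))
    ([], [])

-- ===== PORT B =====
-- 'squeezed = []; for word in sentence: if not squeezed or squeezed[-1] != word: squeezed.append(word)'
def squeeze (sentence : List String) : List String :=
  sentence.foldl (fun squeezed word =>
    if squeezed.isEmpty || !(squeezed.getLast? == some word) then squeezed ++ [word]
    else squeezed) []

def split_sentences_alt (sentences : List (List String)) : List (List String) × List (List String) :=
  let flagged := sentences.map (fun sentence => (sentence, squeeze sentence == sentence))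
  let correct := (flagged.filter (fun p => p.2)).map (fun p => p.1)
  let incorrect := (flagged.filter (fun p => !p.2)).map (fun p => p.1)
  (correct, incorrect)

-- ===== PRECONDITION & SPEC =====
def Spec_split_sentences (sentences : List (List String)) (out : List (List String) × List (List String)) : Prop := out = split_sentences_alt sentences
instance (sentences : List (List String)) (out : List (List String) × List (List String)) : Decidable (Spec_split_sentences sentences out) := by unfold Spec_split_sentences; infer_instance

-- ===== CLAIM (what is proved, stated in full; the proofs are below) =====
def Claim_equal_split_sentences : Prop := ∀ (sentences : List (List String)), Dom_split_sentences sentences → Spec_split_sentences sentences (split_sentences sentences)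

-- ===== LEMMAS AND PROOFS =====

-- recursive characterisation of run compression after a word a
def dedupFrom (a : String) : List String → List String
  | [] => []
  | b :: t => if b == a then dedupFrom a t else b :: dedupFrom b t

-- A's pair scan after a word a
def adjFrom (a : String) : List String → Bool
  | [] => false
  | b :: t => (a == b) || adjFrom b t

theorem dedupFrom_length_le (t : List String) (a : String) :
    (dedupFrom a t).length ≤ t.length := by
  induction t generalizing a with
  | nil => simp [dedupFrom]
  | cons b u ih =>
    simp only [dedupFrom]
    split
    · exact Nat.le_succ_of_le (ih a)
    · simpa using Nat.succ_le_succ (ih b)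

theorem dedupFrom_eq_iff (t : List String) (a : String) :
    (decide (dedupFrom a t = t)) = !adjFrom a t := by
  induction t generalizing a with
  | nil => simp [dedupFrom, adjFrom]
  | cons b u ih =>
    by_cases h : b = a
    · subst h
      have hlt : (dedupFrom b u).length < (b :: u).length := by
        have := dedupFrom_length_le u b; simp; omega
      have hne : dedupFrom b (b :: u) ≠ b :: u := by
        simp only [dedupFrom, beq_self_eq_true, if_true]
        intro he; rw [he] at hlt; omega
      simp [adjFrom, hne]
    · have hb : (b == a) = false := by simpa using h
      have ha : (a == b) = false := by simpa using Ne.symm h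
      simp only [dedupFrom, hb, Bool.false_eq_true, if_false, adjFrom, ha, Bool.false_or]
      rw [← ih b]
      simp
theorem squeeze_go (t : List String) (pre : List String) (a : String)
    (hne : pre ≠ []) (hl : pre.getLast? = some a) :
    t.foldl (fun squeezed word =>
      if squeezed.isEmpty || !(squeezed.getLast? == some word) then squeezed ++ [word]
      else squeezed) pre = pre ++ dedupFrom a t := by
  induction t generalizing pre a with
  | nil => simp [dedupFrom]
  | cons b u ih =>
    simp only [List.foldl_cons, dedupFrom]
    by_cases h : b = a
    · subst h
      have : (pre.isEmpty || !(pre.getLast? == some b)) = false := by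
        simp [hne, hl]
      rw [this]
      simp only [Bool.false_eq_true, if_false, beq_self_eq_true, if_true]
      exact ih pre b hne hl
    · have hb : (b == a) = false := by simpa using h
      have hcond : (pre.isEmpty || !(pre.getLast? == some b)) = true := by
        simp [hl]
        exact Or.inr (fun he => h he.symm)
      rw [hcond]
      simp only [if_true, hb, Bool.false_eq_true, if_false]
      rw [ih (pre ++ [b]) b (by simp) (by simp)]
      simp

theorem squeeze_eq (a : String) (t : List String) :
    squeeze (a :: t) = a :: dedupFrom a t := by
  unfold squeeze
  simp only [List.foldl_cons, List.isEmpty_nil, Bool.true_or, if_true, List.nil_append]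
  exact squeeze_go t [a] a (by simp) (by simp)

theorem containsGo_zip (t : List String) (a : String) :
    containsRepetitionsGo (List.zip (a :: t) t) = adjFrom a t := by
  induction t generalizing a with
  | nil => rfl
  | cons b u ih =>
    simp only [List.zip_cons_cons, containsRepetitionsGo, adjFrom]
    by_cases h : a = b
    · simp [h]
    · have : (a == b) = false := by simpa using h
      simp [this, ih]

theorem contains_eq_not_fixed (s : List String) :
    containsRepetitions s = !(squeeze s == s) := by
  cases s with
  | nil => rfl
  | cons a t =>
    have h1 : containsRepetitions (a :: t) = adjFrom a t := by
      unfold containsRepetitions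
      rw [PySem.List.slice_from_one]
      exact containsGo_zip t a
    rw [h1, squeeze_eq]
    have h2 : ((a :: dedupFrom a t) == (a :: t)) = decide (dedupFrom a t = t) := by
      by_cases he : dedupFrom a t = t <;> simp [he]
    rw [h2, dedupFrom_eq_iff]
    simp

theorem split_eq (sentences : List (List String)) (c i : List (List String)) :
    sentences.foldl
      (fun acc sentence =>
        if containsRepetitions sentence then (acc.1, acc.2 ++ [sentence])
        else (acc.1 ++ [sentence], acc.2))
      (c, i)
    = (c ++ ((sentences.map (fun s => (s, squeeze s == s))).filter (fun p => p.2)).map (fun p => p.1),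
       i ++ ((sentences.map (fun s => (s, squeeze s == s))).filter (fun p => !p.2)).map (fun p => p.1)) := by
  induction sentences generalizing c i with
  | nil => simp
  | cons s rest ih =>
    simp only [List.foldl_cons, List.map_cons, List.filter_cons]
    by_cases h : (squeeze s == s) = true
    · have hc : containsRepetitions s = false := by rw [contains_eq_not_fixed, h]; rfl
      simp only [hc, Bool.false_eq_true, if_false, h, if_true]
      rw [ih]
      simp
    · have hf : (squeeze s == s) = false := by simpa using h
      have hc : containsRepetitions s = true := by rw [contains_eq_not_fixed, hf]; rfl
      simp only [hc, if_true, hf, Bool.false_eq_true, if_false]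
      rw [ih]
      simp

-- ===== VERDICT (by name: the statement is the Claim_ definition above) =====
theorem split_sentences_spec : Claim_equal_split_sentences := by
  intro sentences _
  show split_sentences sentences = split_sentences_alt sentences
  unfold split_sentences split_sentences_alt
  rw [split_eq]
  simp
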